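-- pv_equiv track=rewrite | github.com/woletee/1D_ARC | src/backend/genetic_algorithm.py | pcopy_1c
-- ===== SOURCE A (Python) =====
-- def pcopy_1c(input_sequence):
--     output_sequence = input_sequence.copy()
--     index = None  # Initialize index to None
--     for i in range(1, len(input_sequence) - 1):  # Start from 1 and end at len - 1 to safely access i-1 and i+1
--         if input_sequence[i] != 0:
--             # Check if the current number is part of a sequence
--             if input_sequence[i] == input_sequence[i - 1] and input_sequence[i] == input_sequence[i + 1]:
--                 index = i  # Only update index if current number is part of a sequence
--             elif input_sequence[i + 1] == 0 and input_sequence[i - 1] == 0 and index is not None: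
--                 # Only modify neighbors if index has been assigned a valid number
--                 output_sequence[i - 1] = input_sequence[index]
--                 output_sequence[i + 1] = input_sequence[index]
--     return output_sequence
-- ===== SOURCE B (Python) =====
-- def pcopy_1c(input_sequence):
--     n = len(input_sequence)
--     # Pass 1: last[i] = value of the most recent triple-center strictly before i (None if none yet).
--     last = []
--     cur = None
--     for i in range(n):
--         last.append(cur)
--         if 1 <= i <= n - 2 and input_sequence[i] != 0 and input_sequence[i - 1] == input_sequence[i] == input_sequence[i + 1]:
--             cur = input_sequence[i]
--     # Pass 2: copy the carried triple value to the zero neighbors of each isolated nonzero cell.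
--     output_sequence = list(input_sequence)
--     for i in range(1, n - 1):
--         if input_sequence[i] != 0 and input_sequence[i - 1] == 0 and input_sequence[i + 1] == 0 and last[i] is not None:
--             output_sequence[i - 1] = last[i]
--             output_sequence[i + 1] = last[i]
--     return output_sequence
-- ===== Notes on version B (the rewrite author's own statement) =====
-- stated objective: alternative
-- what changed: A's single loop carrying a mutable last-triple-center index is replaced by two stateless passes: a precomputed list last[i] holding the value of the most recent triple-center before i, then a copy pass that writes last[i] to the zero neighbors of each isolated nonzero cell.
import Mathlib
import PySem

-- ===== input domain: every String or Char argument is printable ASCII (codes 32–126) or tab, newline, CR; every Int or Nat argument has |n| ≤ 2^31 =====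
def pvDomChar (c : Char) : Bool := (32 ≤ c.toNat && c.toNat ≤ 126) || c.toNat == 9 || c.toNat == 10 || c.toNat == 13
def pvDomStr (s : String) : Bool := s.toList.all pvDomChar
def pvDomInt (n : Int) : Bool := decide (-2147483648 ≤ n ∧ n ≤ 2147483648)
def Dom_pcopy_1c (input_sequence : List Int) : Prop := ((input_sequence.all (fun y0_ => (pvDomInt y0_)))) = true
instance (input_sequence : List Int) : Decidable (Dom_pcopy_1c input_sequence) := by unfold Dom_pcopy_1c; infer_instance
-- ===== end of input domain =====

-- B replaces A's single stateful loop (carrying the last triple-center index) by two passes: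
-- a precomputed "last triple-center value" list, then a stateless copy pass (objective: alternative; same cost).

-- ===== PORT A =====
-- one loop over range(1, len-1) carrying the state (output_sequence, index)
def pcopy_1c (input_sequence : List Int) : List Int :=
  ((PySem.List.pyRange 1 ((input_sequence.length : Int) - 1) 1).foldl
    (fun (st : List Int × Option Int) i =>
      if PySem.List.pyGetD input_sequence i 0 ≠ 0 then
        if PySem.List.pyGetD input_sequence i 0 = PySem.List.pyGetD input_sequence (i - 1) 0 ∧
           PySem.List.pyGetD input_sequence i 0 = PySem.List.pyGetD input_sequence (i + 1) 0 then
          (st.1, some i)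
        else if PySem.List.pyGetD input_sequence (i + 1) 0 = 0 ∧
                PySem.List.pyGetD input_sequence (i - 1) 0 = 0 then
          match st.2 with
          | some j =>
            let v := PySem.List.pyGetD input_sequence j 0
            (PySem.List.pySetD (PySem.List.pySetD st.1 (i - 1) v) (i + 1) v, st.2)
          | none => st
        else st
      else st)
    (input_sequence, (none : Option Int))).1

-- ===== PORT B =====
-- pass 1: last[i] = value of the most recent triple-center strictly before i (none if none yet)
def pcopy1cLast (input_sequence : List Int) : List (Option Int) :=
  ((PySem.List.pyRange 0 (input_sequence.length : Int) 1).foldl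
    (fun (st : List (Option Int) × Option Int) i =>
      (st.1 ++ [st.2],
       if 1 ≤ i ∧ i ≤ (input_sequence.length : Int) - 2 ∧
          PySem.List.pyGetD input_sequence i 0 ≠ 0 ∧
          PySem.List.pyGetD input_sequence (i - 1) 0 = PySem.List.pyGetD input_sequence i 0 ∧
          PySem.List.pyGetD input_sequence i 0 = PySem.List.pyGetD input_sequence (i + 1) 0 then
         some (PySem.List.pyGetD input_sequence i 0)
       else st.2))
    (([] : List (Option Int)), (none : Option Int))).1

-- pass 2: copy the carried value to the zero neighbors of each isolated nonzero cell
def pcopy_1c_alt (input_sequence : List Int) : List Int :=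
  let last := pcopy1cLast input_sequence
  (PySem.List.pyRange 1 ((input_sequence.length : Int) - 1) 1).foldl
    (fun out i =>
      if PySem.List.pyGetD input_sequence i 0 ≠ 0 ∧
         PySem.List.pyGetD input_sequence (i - 1) 0 = 0 ∧
         PySem.List.pyGetD input_sequence (i + 1) 0 = 0 then
        match PySem.List.pyGetD last i none with
        | some v => PySem.List.pySetD (PySem.List.pySetD out (i - 1) v) (i + 1) v
        | none => out
      else out)
    input_sequence

-- ===== PRECONDITION & SPEC =====
def Spec_pcopy_1c (input_sequence : List Int) (out : List Int) : Prop := out = pcopy_1c_alt input_sequence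
instance (input_sequence : List Int) (out : List Int) : Decidable (Spec_pcopy_1c input_sequence out) := by unfold Spec_pcopy_1c; infer_instance

-- ===== CLAIM (what is proved, stated in full; the proofs are below) =====
def Claim_equal_pcopy_1c : Prop := ∀ (input_sequence : List Int), Dom_pcopy_1c input_sequence → Spec_pcopy_1c input_sequence (pcopy_1c input_sequence)

-- ===== LEMMAS AND PROOFS =====

-- recursive characterisation of the pass-1 "last triple-center value" state
def lastVal (xs : List Int) : Nat → Option Int
  | 0 => none
  | k + 1 =>
    if 1 ≤ (k : Int) ∧ (k : Int) ≤ (xs.length : Int) - 2 ∧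
       PySem.List.pyGetD xs (k : Int) 0 ≠ 0 ∧
       PySem.List.pyGetD xs ((k : Int) - 1) 0 = PySem.List.pyGetD xs (k : Int) 0 ∧
       PySem.List.pyGetD xs (k : Int) 0 = PySem.List.pyGetD xs ((k : Int) + 1) 0 then
      some (PySem.List.pyGetD xs (k : Int) 0)
    else lastVal xs k

theorem last_aux (xs : List Int) (m : Nat) : ∀ (a : Int) (acc : List (Option Int)),
    0 ≤ a → ((xs.length : Int) - a).toNat = m →
    (PySem.List.pyRange a (xs.length : Int) 1).foldl
      (fun (st : List (Option Int) × Option Int) i =>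
        (st.1 ++ [st.2],
         if 1 ≤ i ∧ i ≤ (xs.length : Int) - 2 ∧
            PySem.List.pyGetD xs i 0 ≠ 0 ∧
            PySem.List.pyGetD xs (i - 1) 0 = PySem.List.pyGetD xs i 0 ∧
            PySem.List.pyGetD xs i 0 = PySem.List.pyGetD xs (i + 1) 0 then
           some (PySem.List.pyGetD xs i 0)
         else st.2))
      (acc, lastVal xs a.toNat)
    = (acc ++ (List.range' a.toNat m).map (lastVal xs), lastVal xs (a.toNat + m)) := by
  induction m with
  | zero =>
    intro a acc ha hm
    rw [PySem.List.pyRange_one_eq_nil (by omega)]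
    simp
  | succ m ih =>
    intro a acc ha hm
    rw [PySem.List.pyRange_one_cons (by omega)]
    rw [List.foldl_cons]
    have hk : ((a.toNat : Nat) : Int) = a := Int.toNat_of_nonneg ha
    have hstep : (if 1 ≤ a ∧ a ≤ (xs.length : Int) - 2 ∧
            PySem.List.pyGetD xs a 0 ≠ 0 ∧
            PySem.List.pyGetD xs (a - 1) 0 = PySem.List.pyGetD xs a 0 ∧
            PySem.List.pyGetD xs a 0 = PySem.List.pyGetD xs (a + 1) 0 then
           some (PySem.List.pyGetD xs a 0)
         else lastVal xs a.toNat) = lastVal xs (a.toNat + 1) := by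
      conv_rhs => rw [lastVal]
      rw [hk]
    have h1 : (a + 1).toNat = a.toNat + 1 := by omega
    have := ih (a + 1) (acc ++ [lastVal xs a.toNat]) (by omega) (by omega)
    rw [h1] at this
    simp only [hstep]
    rw [this]
    have : List.range' a.toNat (m + 1) = a.toNat :: List.range' (a.toNat + 1) m := by
      rw [List.range'_succ]
    rw [this]
    simp [add_assoc, add_comm 1 m]

theorem pcopy1cLast_eq (xs : List Int) :
    pcopy1cLast xs = (List.range xs.length).map (lastVal xs) := by
  unfold pcopy1cLast
  have h0 : lastVal xs (0 : Int).toNat = none := rfl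
  rw [← h0, last_aux xs xs.length 0 [] le_rfl (by omega)]
  simp [List.range_eq_range']

theorem loop_aux (xs : List Int) (m : Nat) : ∀ (a : Int) (out : List Int) (idx : Option Int),
    1 ≤ a → ((xs.length : Int) - 1 - a).toNat = m →
    idx.map (fun j => PySem.List.pyGetD xs j 0) = lastVal xs a.toNat →
    ((PySem.List.pyRange a ((xs.length : Int) - 1) 1).foldl
      (fun (st : List Int × Option Int) i =>
        if PySem.List.pyGetD xs i 0 ≠ 0 then
          if PySem.List.pyGetD xs i 0 = PySem.List.pyGetD xs (i - 1) 0 ∧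
             PySem.List.pyGetD xs i 0 = PySem.List.pyGetD xs (i + 1) 0 then
            (st.1, some i)
          else if PySem.List.pyGetD xs (i + 1) 0 = 0 ∧
                  PySem.List.pyGetD xs (i - 1) 0 = 0 then
            match st.2 with
            | some j =>
              let v := PySem.List.pyGetD xs j 0
              (PySem.List.pySetD (PySem.List.pySetD st.1 (i - 1) v) (i + 1) v, st.2)
            | none => st
          else st
        else st)
      (out, idx)).1
    = (PySem.List.pyRange a ((xs.length : Int) - 1) 1).foldl
      (fun o i =>
        if PySem.List.pyGetD xs i 0 ≠ 0 ∧
           PySem.List.pyGetD xs (i - 1) 0 = 0 ∧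
           PySem.List.pyGetD xs (i + 1) 0 = 0 then
          match lastVal xs i.toNat with
          | some v => PySem.List.pySetD (PySem.List.pySetD o (i - 1) v) (i + 1) v
          | none => o
        else o)
      out := by
  induction m with
  | zero =>
    intro a out idx ha hm hinv
    rw [PySem.List.pyRange_one_eq_nil (by omega)]
    rfl
  | succ m ih =>
    intro a out idx ha hm hinv
    rw [PySem.List.pyRange_one_cons (by omega), List.foldl_cons, List.foldl_cons]
    have hk : ((a.toNat : Nat) : Int) = a := Int.toNat_of_nonneg (by omega)
    have hsucc : (a + 1).toNat = a.toNat + 1 := by omega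
    have hlv : lastVal xs (a.toNat + 1) =
        (if 1 ≤ a ∧ a ≤ (xs.length : Int) - 2 ∧
            PySem.List.pyGetD xs a 0 ≠ 0 ∧
            PySem.List.pyGetD xs (a - 1) 0 = PySem.List.pyGetD xs a 0 ∧
            PySem.List.pyGetD xs a 0 = PySem.List.pyGetD xs (a + 1) 0 then
           some (PySem.List.pyGetD xs a 0)
         else lastVal xs a.toNat) := by
      rw [lastVal, hk]
    by_cases hz : PySem.List.pyGetD xs a 0 ≠ 0
    · by_cases htr : PySem.List.pyGetD xs a 0 = PySem.List.pyGetD xs (a - 1) 0 ∧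
          PySem.List.pyGetD xs a 0 = PySem.List.pyGetD xs (a + 1) 0
      · -- triple center: A records the index, B's copy pass does nothing here
        simp only [if_pos hz, if_pos htr]
        have hnb : ¬ (PySem.List.pyGetD xs a 0 ≠ 0 ∧
            PySem.List.pyGetD xs (a - 1) 0 = 0 ∧
            PySem.List.pyGetD xs (a + 1) 0 = 0) := by
          rintro ⟨_, h1, _⟩; exact hz (htr.1.trans h1)
        rw [if_neg hnb]
        apply ih (a + 1) out (some a) (by omega) (by omega)
        rw [hsucc, hlv]
        rw [if_pos ⟨ha, by omega, hz, htr.1.symm, htr.2⟩]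
        simp
      · -- not a triple center: the carried value is unchanged
        have hlv' : lastVal xs (a.toNat + 1) = lastVal xs a.toNat := by
          rw [hlv, if_neg]
          rintro ⟨_, _, _, h4, h5⟩; exact htr ⟨h4.symm, h5⟩
        simp only [if_pos hz, if_neg htr]
        by_cases hiso : PySem.List.pyGetD xs (a + 1) 0 = 0 ∧ PySem.List.pyGetD xs (a - 1) 0 = 0
        · rw [if_pos hiso, if_pos ⟨hz, hiso.2, hiso.1⟩]
          cases idx with
          | none =>
            have : lastVal xs a.toNat = none := by rw [← hinv]; rfl
            rw [this]
            exact ih (a + 1) out none (by omega) (by omega) (by rw [hsucc, hlv']; exact hinv)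
          | some j =>
            have : lastVal xs a.toNat = some (PySem.List.pyGetD xs j 0) := by rw [← hinv]; rfl
            rw [this]
            exact ih (a + 1) _ (some j) (by omega) (by omega) (by rw [hsucc, hlv']; exact hinv)
        · rw [if_neg hiso, if_neg (by rintro ⟨_, h2, h3⟩; exact hiso ⟨h3, h2⟩)]
          exact ih (a + 1) out idx (by omega) (by omega) (by rw [hsucc, hlv']; exact hinv)
    · have hlv' : lastVal xs (a.toNat + 1) = lastVal xs a.toNat := by
        rw [hlv, if_neg]; rintro ⟨_, _, h3, _⟩; exact hz h3
      rw [if_neg hz, if_neg (by rintro ⟨h1, _⟩; exact hz h1)]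
      exact ih (a + 1) out idx (by omega) (by omega) (by rw [hsucc, hlv']; exact hinv)

theorem main_loop_eq (xs : List Int) : pcopy_1c xs = pcopy_1c_alt xs := by
  unfold pcopy_1c pcopy_1c_alt
  have h1 : lastVal xs (1 : Int).toNat = none := by
    show lastVal xs 1 = none
    rw [lastVal, if_neg (by rintro ⟨h, -⟩; norm_num at h)]
    rfl
  rw [loop_aux xs ((xs.length : Int) - 1 - 1).toNat 1 xs none le_rfl rfl (by rw [h1]; rfl)]
  apply PySem.List.foldl_congr_mem'
  intro i hi o
  have hmem := (PySem.List.mem_pyRange_one).mp hi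
  obtain ⟨k, rfl⟩ : ∃ k : Nat, i = (k : Int) := ⟨i.toNat, by omega⟩
  have hk : k < xs.length := by omega
  have hget : PySem.List.pyGetD (pcopy1cLast xs) (k : Int) none = lastVal xs ((k : Int)).toNat := by
    rw [pcopy1cLast_eq, PySem.List.pyGetD_natCast]
    simp [List.getD_eq_getElem?_getD, List.getElem?_range hk]
  rw [hget]

-- ===== VERDICT =====
theorem pcopy_1c_spec : Claim_equal_pcopy_1c := by
  intro xs _
  unfold Spec_pcopy_1c
  exact main_loop_eq xs
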